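-- pv_equiv track=rewrite | github.com/MrBrantCode/unitest_baseline | mut_generate/mist_train_taco/taco_16182/solution.py | calculate_minimum_wire_length
-- ===== SOURCE A (Python) =====
-- def calculate_minimum_wire_length(t, datasets):
--     results = []
--     for dataset in datasets:
--         n, k, x = dataset
--         x.sort()
--         diff = []
--         for i in range(1, len(x)):
--             diff.append(x[i] - x[i - 1])
--         diff.sort(reverse=True)
--         s = sum(diff[:k - 1])
--         min_wire_length = max(x) - min(x) - s
--         results.append(min_wire_length)
--     return results
-- ===== SOURCE B (Python) =====
-- def calculate_minimum_wire_length(t, datasets):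
--     # Selection by repeated max-extraction: never sorts the gap list.
--     # Start from the full span and peel off the k-1 largest gaps one at a
--     # time by scanning for the current maximum and removing it.
--     # (A sorts x in place; B does not mutate its arguments.)
--     results = []
--     for n, k, x in datasets:
--         xs = sorted(x)
--         gaps = [b - a for a, b in zip(xs, xs[1:])]
--         total = xs[-1] - xs[0]
--         for _ in range(k - 1):
--             if not gaps:
--                 break
--             g = max(gaps)
--             gaps.remove(g)
--             total -= g
--         results.append(total)
--     return results
-- ===== Notes on version B (the rewrite author's own statement) =====
-- stated objective: alternative
-- what changed: B never sorts the gap list: it starts from the full span and peels off the k-1 largest gaps by a selection loop (scan for the current max, remove it, subtract it), instead of A's reverse sort of the gaps plus slice-sum and span subtraction; note A sorts x in place while B leaves x unmutated. Pre_ excludes datasets with an empty point list (A raises ValueError) and datasets with a nonpositive group count k, outside the task's natural domain, where A's diff[:k-1] wraps to a negative Python slice.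
-- outside the precondition, e.g. on calculate_minimum_wire_length(0, [(3, 0, [0, 5, 10])]): A returns [5], B returns [10]; on calculate_minimum_wire_length(0, [(2, -1, [1, 2, 4, 8])]): A returns [3], B returns [7]
import Mathlib
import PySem

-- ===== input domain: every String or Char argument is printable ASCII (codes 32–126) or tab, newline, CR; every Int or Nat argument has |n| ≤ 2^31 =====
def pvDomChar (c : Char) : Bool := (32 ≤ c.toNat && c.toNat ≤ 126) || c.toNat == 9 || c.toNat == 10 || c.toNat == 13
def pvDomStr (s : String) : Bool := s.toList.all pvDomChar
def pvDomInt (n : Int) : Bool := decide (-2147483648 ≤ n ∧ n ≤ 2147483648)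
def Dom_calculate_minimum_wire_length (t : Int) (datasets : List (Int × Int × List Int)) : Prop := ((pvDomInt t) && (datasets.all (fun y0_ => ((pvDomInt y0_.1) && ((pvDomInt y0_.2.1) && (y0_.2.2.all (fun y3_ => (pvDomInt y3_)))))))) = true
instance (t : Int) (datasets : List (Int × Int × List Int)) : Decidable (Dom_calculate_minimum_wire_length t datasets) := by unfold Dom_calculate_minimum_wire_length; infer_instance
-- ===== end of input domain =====

-- B never sorts the gap list: it starts from the full span and peels off the k-1 largest gaps by a
-- selection loop (scan for the current max, remove it, subtract it), instead of A's reverse sort of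
-- the gaps plus slice-sum and span subtraction.
-- A sorts each x in place; B does not mutate its arguments (equivalence here is about the return value).

-- ===== PORT A =====
def calculate_minimum_wire_length (t : Int) (datasets : List (Int × Int × List Int)) : List Int :=
  datasets.foldl (fun results dataset =>
    let k := dataset.2.1
    let xs := PySem.List.sorted dataset.2.2 (fun v => v) false          -- x.sort()
    -- for i in range(1, len(x)): diff.append(x[i] - x[i-1]); every index is in range, so .getD 0 is unreachable
    let diff := (PySem.List.pyRange 1 (xs.length : Int) 1).foldl
      (fun acc i => acc ++ [(PySem.List.pyGet? xs i).getD 0 - (PySem.List.pyGet? xs (i - 1)).getD 0]) []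
    let diffS := PySem.List.sorted diff (fun v => v) true               -- diff.sort(reverse=True)
    let s := (PySem.List.slice diffS none (some (k - 1))).sum           -- sum(diff[:k-1])
    -- max()/min() of an empty x raise ValueError (= none); such inputs are excluded by Pre_, so .getD 0 is unreachable
    let mwl := (PySem.List.max? xs (fun v => v)).getD 0 - (PySem.List.min? xs (fun v => v)).getD 0 - s
    results ++ [mwl]) []

-- ===== PORT B =====
-- 'for _ in range(k - 1): if not gaps: break; g = max(gaps); gaps.remove(g); total -= g'
-- max(gaps) is guarded by the nonempty check and g ∈ gaps, so both .getD are unreachable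
def pvBLoop : Nat → List Int → Int → Int
  | 0, _, total => total
  | Nat.succ n, gaps, total =>
    if gaps = [] then total
    else
      let g := (PySem.List.max? gaps (fun v => v)).getD 0
      pvBLoop n ((PySem.List.remove? gaps g).getD []) (total - g)

def calculate_minimum_wire_length_alt (t : Int) (datasets : List (Int × Int × List Int)) : List Int :=
  datasets.foldl (fun results d =>
    let xs := PySem.List.sorted d.2.2 (fun v => v) false                -- sorted(x)
    let gaps := (xs.zip (PySem.List.slice xs (some 1) none)).map (fun p => p.2 - p.1)  -- zip(xs, xs[1:])
    let total := (PySem.List.pyGet? xs (-1)).getD 0 - (PySem.List.pyGet? xs 0).getD 0  -- xs[-1] - xs[0]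
    results ++ [pvBLoop (d.2.1 - 1).toNat gaps total]) []

-- ===== PRECONDITION & SPEC =====
-- Pre_ excludes (a) the inputs where A raises — a dataset whose point list x is empty makes max(x)
-- raise ValueError (B's xs[-1] raises IndexError there as well) — and (b) the datasets with a
-- nonpositive group count k (outside the task's natural domain: the wire is cut into k ≥ 1 pieces)
-- on which A's slice diff[:k-1] wraps around to a negative Python slice and changes the result,
-- an accident of A's implementation; B's loop naturally removes no gap there.
def Pre_calculate_minimum_wire_length (t : Int) (datasets : List (Int × Int × List Int)) : Prop :=
  ∀ d ∈ datasets, d.2.2 ≠ [] ∧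
    (1 ≤ d.2.1 ∨ ¬ (3 ≤ (d.2.2.length : Int) + d.2.1 ∧ ∃ a ∈ d.2.2, ∃ b ∈ d.2.2, a ≠ b))
instance (t : Int) (datasets : List (Int × Int × List Int)) : Decidable (Pre_calculate_minimum_wire_length t datasets) := by unfold Pre_calculate_minimum_wire_length; infer_instance
def pvWitness_calculate_minimum_wire_length : Int × (List (Int × Int × List Int)) := (0, [(3, 2, [1, 3, 10])])

def Spec_calculate_minimum_wire_length (t : Int) (datasets : List (Int × Int × List Int)) (out : List Int) : Prop := out = calculate_minimum_wire_length_alt t datasets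
instance (t : Int) (datasets : List (Int × Int × List Int)) (out : List Int) : Decidable (Spec_calculate_minimum_wire_length t datasets out) := by unfold Spec_calculate_minimum_wire_length; infer_instance

-- ===== CLAIM (what is proved, stated in full; the proofs are below) =====
def Claim_equal_calculate_minimum_wire_length : Prop := ∀ (t : Int) (datasets : List (Int × Int × List Int)), Dom_calculate_minimum_wire_length t datasets → Pre_calculate_minimum_wire_length t datasets → Spec_calculate_minimum_wire_length t datasets (calculate_minimum_wire_length t datasets)

-- ===== LEMMAS AND PROOFS =====

-- per-dataset value computed by A's loop body
def pvFA (d : Int × Int × List Int) : Int :=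
  let k := d.2.1
  let xs := PySem.List.sorted d.2.2 (fun v => v) false
  let diff := (PySem.List.pyRange 1 (xs.length : Int) 1).foldl
    (fun acc i => acc ++ [(PySem.List.pyGet? xs i).getD 0 - (PySem.List.pyGet? xs (i - 1)).getD 0]) []
  let diffS := PySem.List.sorted diff (fun v => v) true
  let s := (PySem.List.slice diffS none (some (k - 1))).sum
  (PySem.List.max? xs (fun v => v)).getD 0 - (PySem.List.min? xs (fun v => v)).getD 0 - s

-- per-dataset value computed by B's loop body
def pvFB (d : Int × Int × List Int) : Int :=
  let xs := PySem.List.sorted d.2.2 (fun v => v) false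
  let gaps := (xs.zip (PySem.List.slice xs (some 1) none)).map (fun p => p.2 - p.1)
  let total := (PySem.List.pyGet? xs (-1)).getD 0 - (PySem.List.pyGet? xs 0).getD 0
  pvBLoop (d.2.1 - 1).toNat gaps total

lemma pv_foldl_app {α β : Type} (g : α → β) (l : List α) (acc : List β) :
    l.foldl (fun r x => r ++ [g x]) acc = acc ++ l.map g := by
  induction l generalizing acc with
  | nil => simp
  | cons h t ih => simp [ih]

lemma pvA_eq_map (t : Int) (ds : List (Int × Int × List Int)) :
    calculate_minimum_wire_length t ds = ds.map pvFA := by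
  unfold calculate_minimum_wire_length
  have h := pv_foldl_app pvFA ds []
  simp only [List.nil_append] at h
  exact h

lemma pvB_eq_map (t : Int) (ds : List (Int × Int × List Int)) :
    calculate_minimum_wire_length_alt t ds = ds.map pvFB := by
  unfold calculate_minimum_wire_length_alt
  have h := pv_foldl_app pvFB ds []
  simp only [List.nil_append] at h
  exact h

-- A's index loop over range(1, len(l)) builds exactly the zip-with-tail gap list
lemma pv_diff_eq (l : List Int) :
    (PySem.List.pyRange 1 (l.length : Int) 1).foldl
      (fun acc i => acc ++ [(PySem.List.pyGet? l i).getD 0 - (PySem.List.pyGet? l (i - 1)).getD 0]) []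
      = (l.zip (PySem.List.slice l (some 1) none)).map (fun p => p.2 - p.1) := by
  rw [pv_foldl_app, PySem.List.slice_from_one, PySem.List.pyRange_one]
  apply List.ext_getElem
  · simp
  · intro i h1 h2
    simp only [List.nil_append, List.map_map, Function.comp, List.getElem_map, List.getElem_range,
      List.getElem_zip]
    have hi : i + 1 < l.length := by
      simp at h2
      omega
    have e1 : (1 : Int) + (i : Int) = ((i + 1 : Nat) : Int) := by push_cast; ring
    have e2 : ((i + 1 : Nat) : Int) - 1 = ((i : Nat) : Int) := by push_cast; ring
    rw [e1, e2, PySem.List.pyGet?_natCast, PySem.List.pyGet?_natCast]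
    simp [hi, List.getElem_tail, Nat.lt_of_succ_lt hi]

lemma pv_le_getLast (s : List Int) (h : s ≠ []) (hp : s.Pairwise (fun a b => a ≤ b)) :
    ∀ y ∈ s, y ≤ s.getLast h := by
  induction s with
  | nil => simp at h
  | cons a t ih =>
    intro y hy
    rcases List.mem_cons.mp hy with rfl | hyt
    · cases t with
      | nil => simp
      | cons b u =>
        rw [List.getLast_cons (by simp)]
        have hb := ih (by simp) (List.Pairwise.of_cons hp) b (by simp)
        have hab : y ≤ b := (List.pairwise_cons.mp hp).1 b (by simp)
        omega
    · cases t with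
      | nil => simp at hyt
      | cons b u =>
        rw [List.getLast_cons (by simp)]
        exact ih (by simp) (List.Pairwise.of_cons hp) y hyt

lemma pv_head_le (s : List Int) (h : s ≠ []) (hp : s.Pairwise (fun a b => a ≤ b)) :
    ∀ y ∈ s, s.head h ≤ y := by
  cases s with
  | nil => simp at h
  | cons a t =>
    intro y hy
    rcases List.mem_cons.mp hy with rfl | hyt
    · simp
    · exact le_trans (le_refl _) ((List.pairwise_cons.mp hp).1 y hyt)

lemma pv_max_eq (s : List Int) (h : s ≠ []) (hp : s.Pairwise (fun a b => a ≤ b)) :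
    PySem.List.max? s (fun v => v) = some (s.getLast h) := by
  obtain ⟨m, hm⟩ : ∃ m, PySem.List.max? s (fun v => v) = some m := by
    cases hmx : PySem.List.max? s (fun v => v) with
    | none => exact absurd ((PySem.List.max?_eq_none_iff _ _).mp hmx) h
    | some m => exact ⟨m, rfl⟩
  have h1 := PySem.List.max?_isMax hm
  have h2 := PySem.List.max?_mem hm
  have h3 := pv_le_getLast s h hp m h2
  have h4 := h1 (s.getLast h) (List.getLast_mem h)
  rw [hm]
  simp only [] at h1 h4
  have : m = s.getLast h := le_antisymm h3 h4
  rw [this]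

lemma pv_min_eq (s : List Int) (h : s ≠ []) (hp : s.Pairwise (fun a b => a ≤ b)) :
    PySem.List.min? s (fun v => v) = some (s.head h) := by
  obtain ⟨m, hm⟩ : ∃ m, PySem.List.min? s (fun v => v) = some m := by
    cases hmx : PySem.List.min? s (fun v => v) with
    | none => exact absurd ((PySem.List.min?_eq_none_iff _ _).mp hmx) h
    | some m => exact ⟨m, rfl⟩
  have h1 := PySem.List.min?_isMin hm
  have h2 := PySem.List.min?_mem hm
  have h3 := pv_head_le s h hp m h2
  have h4 := h1 (s.head h) (List.head_mem h)
  rw [hm]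
  have : m = s.head h := le_antisymm h4 h3
  rw [this]

-- B's selection loop computes T minus the sum of the n largest elements of g
lemma pvBLoop_eq (n : Nat) : ∀ (g : List Int) (T : Int),
    pvBLoop n g T = T - ((PySem.List.sorted g (fun v => v) true).take n).sum := by
  induction n with
  | zero => intro g T; simp [pvBLoop]
  | succ n ih =>
    intro g T
    by_cases hg : g = []
    · subst hg
      simp [pvBLoop, PySem.List.sorted]
    · obtain ⟨m, rest, hsd⟩ : ∃ m rest, PySem.List.sorted g (fun v => v) true = m :: rest := by
        cases hs : PySem.List.sorted g (fun v => v) true with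
        | nil => exact absurd ((PySem.List.sorted_eq_nil_iff _ _ _).mp hs) hg
        | cons m rest => exact ⟨m, rest, rfl⟩
      have hm_mem : m ∈ g := by
        have := (PySem.List.mem_sorted g (fun v => v) true m).mp
        rw [hsd] at this
        exact this (by simp)
      have hub : ∀ y ∈ g, y ≤ m := PySem.List.key_head_sorted_rev_ge g (fun v => v) hsd
      have hmax : PySem.List.max? g (fun v => v) = some m := by
        obtain ⟨M, hM⟩ : ∃ M, PySem.List.max? g (fun v => v) = some M := by
          cases hmx : PySem.List.max? g (fun v => v) with
          | none => exact absurd ((PySem.List.max?_eq_none_iff _ _).mp hmx) hg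
          | some M => exact ⟨M, rfl⟩
        have hMm : M ≤ m := hub M (PySem.List.max?_mem hM)
        have hmM : m ≤ M := PySem.List.max?_isMax hM m hm_mem
        rw [hM, le_antisymm hMm hmM]
      have hrem : PySem.List.remove? g m = some (g.erase m) :=
        PySem.List.remove?_eq_some_erase g m hm_mem
      have hperm : (PySem.List.sorted g (fun v => v) true).Perm g :=
        PySem.List.sorted_perm g (fun v => v) true
      have hpermE : (g.erase m).Perm rest := by
        have h1 : (m :: rest).Perm g := hsd ▸ hperm
        have h2 := h1.symm.erase m
        simpa using h2
      have hsortedE : PySem.List.sorted (g.erase m) (fun v => v) true = rest := by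
        apply List.Perm.eq_of_pairwise (le := fun a b : Int => b ≤ a)
          (fun a b _ _ h1 h2 => le_antisymm h2 h1)
        · exact PySem.List.sorted_pairwise_rev _ _
        · have := PySem.List.sorted_pairwise_rev g (fun v => v)
          rw [hsd] at this
          exact this.of_cons
        · exact (PySem.List.sorted_perm _ _ _).trans hpermE
      rw [pvBLoop]
      simp only [hg, if_false, hmax, hrem, Option.getD_some]
      rw [ih, hsortedE, hsd]
      simp only [List.take_succ_cons, List.sum_cons]
      ring

-- every gap of an all-equal point list is zero
lemma pv_gap_zero (xs : List Int) (hall : ∀ a ∈ xs, ∀ b ∈ xs, a = b) :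
    ∀ v ∈ (xs.zip (PySem.List.slice xs (some 1) none)).map (fun p => p.2 - p.1), v = 0 := by
  intro v hv
  rw [PySem.List.slice_from_one] at hv
  obtain ⟨p, hp, rfl⟩ := List.mem_map.mp hv
  have h1 : p.1 ∈ xs := List.of_mem_zip hp |>.1
  have h2 : p.2 ∈ xs := List.mem_of_mem_tail (List.of_mem_zip hp |>.2)
  have := hall p.1 h1 p.2 h2
  omega

-- per-dataset agreement on Pre_
lemma pv_per_dataset (d : Int × Int × List Int) (h : d.2.2 ≠ [])
    (hg : 1 ≤ d.2.1 ∨ ¬ (3 ≤ (d.2.2.length : Int) + d.2.1 ∧ ∃ a ∈ d.2.2, ∃ b ∈ d.2.2, a ≠ b)) :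
    pvFA d = pvFB d := by
  unfold pvFA pvFB
  simp only [pv_diff_eq]
  set k := d.2.1 with hk
  set xs := PySem.List.sorted d.2.2 (fun v => v) false with hxs
  have hne : xs ≠ [] := by
    rw [hxs]
    simpa [PySem.List.sorted_eq_nil_iff] using h
  have hp : xs.Pairwise (fun a b => a ≤ b) := PySem.List.sorted_pairwise d.2.2 (fun v => v)
  set gaps := (xs.zip (PySem.List.slice xs (some 1) none)).map (fun p => p.2 - p.1) with hgaps
  have hspan : (PySem.List.max? xs (fun v => v)).getD 0 - (PySem.List.min? xs (fun v => v)).getD 0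
      = (PySem.List.pyGet? xs (-1)).getD 0 - (PySem.List.pyGet? xs 0).getD 0 := by
    rw [pv_max_eq xs hne hp, pv_min_eq xs hne hp, PySem.List.pyGet?_neg_one, PySem.List.pyGet?_zero]
    rw [List.getLast?_eq_getLast_of_ne_nil hne, List.getElem?_eq_getElem (List.length_pos_of_ne_nil hne)]
    simp [List.head_eq_getElem hne]
  rw [pvBLoop_eq, hspan]
  by_cases hk1 : 1 ≤ k
  · -- k ≥ 1: the slice diffS[:k-1] is exactly take (k-1)
    rw [PySem.List.slice_to _ (by omega)]
  · -- k ≤ 0: B takes no gaps; A's negative slice is empty or all-zero on Pre_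
    have hk0 : d.2.1 ≤ 0 := by omega
    have hkn : (k - 1).toNat = 0 := by omega
    rw [hkn]
    simp only [List.take_zero, List.sum_nil]
    have hneg : k - 1 = -(((1 - k).toNat : Nat) : Int) := by omega
    rw [hneg, PySem.List.slice_to_neg_natCast _ _ (by omega)]
    have hlen : (PySem.List.sorted gaps (fun v => v) true).length = xs.length - 1 := by
      rw [PySem.List.length_sorted, hgaps, PySem.List.slice_from_one]
      cases xs with
      | nil => simp
      | cons a t => simp [List.length_zip]
    have hxlen : xs.length = d.2.2.length := by rw [hxs, PySem.List.length_sorted]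
    have hBC : ¬ (3 ≤ (d.2.2.length : Int) + d.2.1 ∧ ∃ a ∈ d.2.2, ∃ b ∈ d.2.2, a ≠ b) := by
      rcases hg with hge1 | hBC
      · omega
      · exact hBC
    rcases not_and_or.mp hBC with hshort | hsame
    · -- fewer than 3-k points: the slice is empty
      have : (PySem.List.sorted gaps (fun v => v) true).length - (1 - k).toNat = 0 := by omega
      rw [this]
      simp
    · -- all points equal: every gap is 0
      have hall : ∀ a ∈ d.2.2, ∀ b ∈ d.2.2, a = b := by
        intro a ha b hb
        by_contra hab
        exact hsame ⟨a, ha, b, hb, hab⟩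
      have hall' : ∀ a ∈ xs, ∀ b ∈ xs, a = b := by
        intro a ha b hb
        exact hall a ((PySem.List.mem_sorted _ _ _ _).mp ha) b ((PySem.List.mem_sorted _ _ _ _).mp hb)
      have hz := pv_gap_zero xs hall'
      have hz' : ∀ v ∈ PySem.List.sorted gaps (fun v => v) true, v = 0 := by
        intro v hv
        exact hz v ((PySem.List.mem_sorted _ _ _ _).mp hv)
      have hsum : ((PySem.List.sorted gaps (fun v => v) true).take
          ((PySem.List.sorted gaps (fun v => v) true).length - (1 - k).toNat)).sum = 0 := by
        apply List.sum_eq_zero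
        intro v hv
        exact hz' v (List.mem_of_mem_take hv)
      rw [hsum]

-- ===== VERDICT (by name: the statement is the Claim_ definition above) =====
theorem calculate_minimum_wire_length_spec : Claim_equal_calculate_minimum_wire_length := by
  intro t ds _ hpre
  unfold Spec_calculate_minimum_wire_length
  rw [pvA_eq_map, pvB_eq_map]
  exact List.map_congr_left (fun d hd => pv_per_dataset d (hpre d hd).1 (hpre d hd).2)
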